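-- pv_equiv track=rewrite | github.com/lukasz-lesiak/AdventOfCode22 | AdventOfCode22/day15/Puzzle30.py | lineRD
-- ===== SOURCE A (Python) =====
-- def lineRD(p1, p2):
--     x_list = []
--     y_list = []
--     for x in range(p2[0], p1[0] + 1):
--         x_list.append(x)
--     for y in range(p1[1], p2[1] + 1):
--         y_list.append(y)
--     return list(zip(reversed(x_list), y_list))
-- ===== SOURCE B (Python) =====
-- def lineRD(p1, p2):
--     n = max(0, min(p1[0] - p2[0] + 1, p2[1] - p1[1] + 1))
--     return [(p1[0] - i, p1[1] + i) for i in range(n)]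
-- ===== Notes on version B (the rewrite author's own statement) =====
-- stated objective: simpler
-- what changed: Replaces the two appended lists, the reversal and the zip by a single clamped count n and one comprehension deriving both coordinates from the index.
import Mathlib
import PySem

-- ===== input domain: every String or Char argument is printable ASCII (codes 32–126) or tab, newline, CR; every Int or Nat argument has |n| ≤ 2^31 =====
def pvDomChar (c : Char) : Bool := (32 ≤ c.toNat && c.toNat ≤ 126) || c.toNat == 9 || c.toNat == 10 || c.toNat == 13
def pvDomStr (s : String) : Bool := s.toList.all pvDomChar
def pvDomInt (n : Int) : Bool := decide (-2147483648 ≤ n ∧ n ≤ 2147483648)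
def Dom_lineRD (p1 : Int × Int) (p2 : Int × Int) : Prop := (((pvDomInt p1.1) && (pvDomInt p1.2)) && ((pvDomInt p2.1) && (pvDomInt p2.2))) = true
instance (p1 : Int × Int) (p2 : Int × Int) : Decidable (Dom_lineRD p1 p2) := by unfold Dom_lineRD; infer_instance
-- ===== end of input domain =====

-- B replaces A's two appended lists + reversal + zip by one clamped count and a single map over the index (objective: simpler).


-- ===== PORT A =====
def lineRD (p1 : Int × Int) (p2 : Int × Int) : List (Int × Int) :=
  let x_list := (PySem.List.pyRange p2.1 (p1.1 + 1) 1).foldl (fun acc x => acc ++ [x]) []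
  let y_list := (PySem.List.pyRange p1.2 (p2.2 + 1) 1).foldl (fun acc y => acc ++ [y]) []
  x_list.reverse.zip y_list

-- ===== PORT B =====
def lineRD_alt (p1 : Int × Int) (p2 : Int × Int) : List (Int × Int) :=
  let n := max 0 (min (p1.1 - p2.1 + 1) (p2.2 - p1.2 + 1))
  (PySem.List.pyRange 0 n 1).map (fun i => (p1.1 - i, p1.2 + i))

-- ===== PRECONDITION & SPEC =====
def Spec_lineRD (p1 : Int × Int) (p2 : Int × Int) (out : List (Int × Int)) : Prop := out = lineRD_alt p1 p2
instance (p1 : Int × Int) (p2 : Int × Int) (out : List (Int × Int)) : Decidable (Spec_lineRD p1 p2 out) := by unfold Spec_lineRD; infer_instance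

-- ===== CLAIM (what is proved, stated in full; the proofs are below) =====
def Claim_equal_lineRD : Prop := ∀ (p1 : Int × Int) (p2 : Int × Int), Dom_lineRD p1 p2 → Spec_lineRD p1 p2 (lineRD p1 p2)

-- ===== LEMMAS AND PROOFS =====

-- appending one-by-one into an accumulator is the identity
theorem foldl_append_singleton {α : Type} (xs acc : List α) :
    xs.foldl (fun a x => a ++ [x]) acc = acc ++ xs := by
  induction xs generalizing acc with
  | nil => simp
  | cons x xs ih => simp [List.foldl, ih]

-- zipping two maps over List.range truncates to the shorter range
theorem zip_map_range {α β : Type} (m n : Nat) (f : Nat → α) (g : Nat → β) :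
    ((List.range m).map f).zip ((List.range n).map g)
      = (List.range (min m n)).map (fun k => (f k, g k)) := by
  apply List.ext_getElem
  · simp
  · intro k h1 h2
    simp

-- reversing a map over List.range flips the index
theorem reverse_map_range {α : Type} (m : Nat) (f : Nat → α) :
    ((List.range m).map f).reverse = (List.range m).map (fun k => f (m - 1 - k)) := by
  apply List.ext_getElem
  · simp
  · intro k h1 h2
    simp at h1 ⊢

-- ===== VERDICT (by name: the statement is the Claim_ definition above) =====
theorem lineRD_spec : Claim_equal_lineRD := by
  unfold Claim_equal_lineRD Spec_lineRD lineRD lineRD_alt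
  intro p1 p2 _
  simp only [foldl_append_singleton, List.nil_append, PySem.List.pyRange_one,
    reverse_map_range, zip_map_range]
  apply List.ext_getElem
  · simp; omega
  · intro k h1 h2
    simp at h1 ⊢
    omega
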